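/- GENERATED by mk_final_copies.py from the proof of the farm's unit `compute_accelerated_huffman` (farm:compute_accelerated_huffman.1: Lemmas.lean) as the
   re-elaboration sweep compiled it — do not edit. -/
import Asan.CheckWalk
import Vorbis.Spec.Units.compute_accelerated_huffman

open X86 X86.User Asan Vorbis

set_option maxRecDepth 4000
set_option maxHeartbeats 4000000

/-
  THE SEGMENTS OF `compute_accelerated_huffman` (0x1044a0, 87 instructions, three loops; stb_vorbis_fixed.c:1160 – 1181).

  The function has three loop heads and several paths into two of them, so the invariants are EXPLICIT structures and every
  loop is one lemma `∀ s, invariant s → ReachVia … s …` proved with `ReachVia.loop` (the body is walked with `u_walk`):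

      AccelEnv      what all segments share from the entry: the machinery's hypotheses, the precondition `AccelPre` as check
                    sites (`pre_facts`), the six fields of the struct the code reads (none inside `fast_huffman`)
      AccelFrame    what every loop head knows of its state: rbx, rsp, code, DF, MXCSR, footprint, shadow, the seven stack slots;
                    `AccelFrame.step` / `.step_loop`: again after a stretch that wrote below the saved registers and into `fast_huffman`
      Init i        head 0x1044d3   `init_loop`   : Init → the state after the `ret`        (measure 1024 − i)
      Outer len i   head 0x104579   `outer_loop`  : Outer → the state after the `ret`       (measure len − i; exit: K5 from `K5b`)
      Inner … z p   head 0x10456c   `inner_loop`  : Inner (round i) → Outer (i + 1)         (measure 1024 − z)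
      enter_outer   the four paths from the end of the first loop (sparse or dense, `len` clamped or not) into `outer_loop`
  The main theorem (Proof.lean) walks the prologue, builds `AccelEnv` and `Init 0` and applies `init_loop`.
  Small facts about the walker's bit-level forms: `zx32_toNat sx32_ofNat part16_ofNat inc32_ofNat part32_ofNat_toInt byte_rt
  ofNat32_toInt ofBV_ofNat32 shl_step shl_step_measure`; content: `k5b_eqOn k5b_store fhinit_eqOn fhinit_store`.
-/

namespace Vorbis.Spec.compute_accelerated_huffman

/-- The registers the function's loops may have changed at a loop head: every general register (the callee `bit_reverse`
promises nothing about the caller-saved ones, the body writes the others). What a loop head knows of a register is stated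
explicitly in `AccelFrame` and the loop invariants. -/
abbrev loopRegs : List Reg :=
  [.r12, .r13, .r14, .r15, .rbx, .rbp, .rax, .rcx, .rdx, .rsi, .rdi, .rsp, .r8, .r9, .r10, .r11,
   .r16, .r17, .r18, .r19, .r20, .r21, .r22, .r23, .r24, .r25, .r26, .r27, .r28, .r29, .r30, .r31]

/-- **What the function knows from its entry, for all of its segments**: the machinery's hypotheses (code, callees, stack room)
and the precondition `AccelPre` in the form the check sites need — every table access as a `Site` of the live set. `sp8`, `ent`,
`se`, `cl`, `cw`, `sc` are the fields `sparse`, `entries`, `sorted_entries`, `codeword_lengths`, `codewords`, `sorted_codewords`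
of the struct at entry (none of them lies in the window `fast_huffman` the function writes). -/
structure AccelEnv (Lay : Layout) (μ : Microarch) (u₀ : State) (others : List Obj) (frames : List (Nat × FrameLayout))
    (u : State) (ret : Word) (sp8 ent se cl cw sc : Nat) : Prop where
  hLay : Lay.hi = 0x1000000
  hμ : UserX.MicroOK μ
  hcode : HasCodeNat Lay u₀ Vorbis.L.compute_accelerated_huffman.entry Vorbis.Code.code_compute_accelerated_huffman.nat
    Vorbis.L.compute_accelerated_huffman.size
  hstore2 : Asan.SmallCheck Lay μ Vorbis.WayInv (Vorbis.CodeOK u₀) [.rax, .rcx, .rdx] 2 Vorbis.L.__asan_store2_noabort.entry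
  hload1 : Asan.SmallCheck Lay μ Vorbis.WayInv (Vorbis.CodeOK u₀) [.rax, .rdx] 1 Vorbis.L.__asan_load1_noabort.entry
  hload4 : Asan.SmallCheck Lay μ Vorbis.WayInv (Vorbis.CodeOK u₀) [.rax, .rcx, .rdx] 4 Vorbis.L.__asan_load4_noabort.entry
  hload8 : Asan.SmallCheck Lay μ Vorbis.WayInv (Vorbis.CodeOK u₀) [.rax, .rcx, .rdx] 8 Vorbis.L.__asan_load8_noabort.entry
  hbr : Calls Lay μ Vorbis.WayInv (Vorbis.conv u₀) Vorbis.L.bit_reverse.entry (Vorbis.Spec.bit_reverse.spec others frames)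
  hsh : ShadowPre others frames u
  ret_lt : ret < 0x40000000
  align : (u.reg .rsp).toNat % 8 = 0
  room : 0x700000 + 96 ≤ (u.reg .rsp).toNat
  top : (u.reg .rsp).toNat + 8 ≤ 0x800000
  stack : Lay.Has (u.reg .rsp - 96) 104
  mx : u.mxcsr &&& 0x1F80 = 0x1F80
  /-- `Live(c, 2120)` -/
  book : Site (Live (stackObjs frames ++ others)) (u.reg .rdi).toNat 2120
  /-- where the struct is: in the data space, off the text, off this function's stack -/
  wbook : 0x119d40 ≤ (u.reg .rdi).toNat ∧ (u.reg .rdi).toNat + 2120 ≤ 0xC00000 ∧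
    ((u.reg .rsp).toNat + 8 ≤ (u.reg .rdi).toNat ∨ (u.reg .rdi).toNat + 2120 ≤ 0x700000)
  /-- the fields the function reads, at entry -/
  f27 : u.mem.readLE (u.reg .rdi + 27) 1 = sp8
  f4 : u.mem.readLE (u.reg .rdi + 4) 4 = ent
  f2112 : u.mem.readLE (u.reg .rdi + 2112) 4 = se
  f8 : u.mem.readLE (u.reg .rdi + 8) 8 = cl
  f40 : u.mem.readLE (u.reg .rdi + 40) 8 = cw
  f2096 : u.mem.readLE (u.reg .rdi + 2096) 8 = sc
  /-- K3n: a dense book has `entries` lengths and `entries` codewords -/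
  dense : sp8 = 0 → ent < 2 ^ 24 ∧
    (∀ i, i < ent → Site (Live (stackObjs frames ++ others)) (cl + i) 1) ∧
    (∀ i, i < ent → Site (Live (stackObjs frames ++ others)) (cw + 4 * i) 4)
  /-- K3s, K4: a sparse book has `sorted_entries` lengths and sorted codewords -/
  sparse : sp8 ≠ 0 → se < 2 ^ 24 ∧
    (∀ i, i < se → Site (Live (stackObjs frames ++ others)) (cl + i) 1) ∧
    (∀ i, i < se → Site (Live (stackObjs frames ++ others)) (sc + 4 * i) 4)

/-- **What every loop head of the function knows about its state `s`**: `rbx = c`, the frame of 72 bytes, the code, DF and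
MXCSR, the footprint so far (the own stack and `fast_huffman`), no store to the shadow, the return address and the six saved
registers in their slots. -/
structure AccelFrame (u₀ u : State) (ret : Word) (s : State) : Prop where
  rbx : s.reg .rbx = u.reg .rdi
  rsp : s.reg .rsp = u.reg .rsp - 72
  /-- (a literal list: the walker reads it; it is `loopRegs`) -/
  kept : RegsKept [.r12, .r13, .r14, .r15, .rbx, .rbp, .rax, .rcx, .rdx, .rsi, .rdi, .rsp, .r8, .r9, .r10, .r11,
    .r16, .r17, .r18, .r19, .r20, .r21, .r22, .r23, .r24, .r25, .r26, .r27, .r28, .r29, .r30, .r31] u s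
  eq : Mem.EqOn 0x100000 0x119d40 u₀.mem s.mem
  df : s.flags .df = false
  mx : s.mxcsr &&& 0x1F80 = 0x1F80
  same : Mem.SameExcept [⟨(u.reg .rsp).toNat - 96, (u.reg .rsp).toNat⟩,
      ⟨(u.reg .rdi).toNat + 48, (u.reg .rdi).toNat + 2096⟩] u.mem s.mem
  un : ShadowUntouched u.mem s.mem
  s0 : UInt64.ofNat (s.mem.readLE (u.reg .rsp) 8) = ret
  s1 : UInt64.ofNat (s.mem.readLE (u.reg .rsp - 8) 8) = u.reg .r15
  s2 : UInt64.ofNat (s.mem.readLE (u.reg .rsp - 16) 8) = u.reg .r14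
  s3 : UInt64.ofNat (s.mem.readLE (u.reg .rsp - 24) 8) = u.reg .r13
  s4 : UInt64.ofNat (s.mem.readLE (u.reg .rsp - 32) 8) = u.reg .r12
  s5 : UInt64.ofNat (s.mem.readLE (u.reg .rsp - 40) 8) = u.reg .rbp
  s6 : UInt64.ofNat (s.mem.readLE (u.reg .rsp - 48) 8) = u.reg .rbx

/-- **The invariant of the loop `for (i = 0; i < len; ++i)`** at its head 0x104579 (stb_vorbis_fixed.c:1171): `r13d = i ≤ len =
r15d`, the byte `sparse` in its stack slot, and every entry of `fast_huffman` is −1 or an index below `i` (`K5b`). -/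
structure Outer (u₀ u : State) (ret : Word) (sp8 len i : Nat) (s : State) : Prop where
  rip : s.rip = Vorbis.L.compute_accelerated_huffman.loop3
  frame : AccelFrame u₀ u ret s
  sb : s.mem.readLE (u.reg .rsp - 57) 1 = sp8
  r13 : s.reg .r13 = UInt64.ofNat i
  r15 : s.reg .r15 = UInt64.ofNat len
  ile : i ≤ len
  k5 : Codebook.K5b s.mem (u.reg .rdi).toNat i

/-- **The invariant of the loop `while (z < FAST_HUFFMAN_TABLE_SIZE)`** at its head 0x10456c (stb_vorbis_fixed.c:1175), in round
`i < len` of the outer loop: `r12d = z` is any value, `r14 = &codeword_lengths[i]` is an address the check at 0x104594 has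
passed, every entry of `fast_huffman` is −1 or an index below `i + 1`. -/
structure Inner (Lay : Layout) (u₀ u : State) (ret : Word) (sp8 len i : Nat) (z p : Word) (s : State) : Prop where
  rip : s.rip = Vorbis.L.compute_accelerated_huffman.loop2
  frame : AccelFrame u₀ u ret s
  sb : s.mem.readLE (u.reg .rsp - 57) 1 = sp8
  r13 : s.reg .r13 = UInt64.ofNat i
  r15 : s.reg .r15 = UInt64.ofNat len
  ilt : i < len
  r12 : s.reg .r12 = z
  r14 : s.reg .r14 = p
  has14 : Lay.Has p 1
  k5 : Codebook.K5b s.mem (u.reg .rdi).toNat (i + 1)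

/-- Every general register is in the list of `AccelFrame.kept`: the clause says nothing (what a loop head knows of a register is
stated explicitly). -/
theorem kept_all (u s : State) :
    RegsKept [.r12, .r13, .r14, .r15, .rbx, .rbp, .rax, .rcx, .rdx, .rsi, .rdi, .rsp, .r8, .r9, .r10, .r11,
      .r16, .r17, .r18, .r19, .r20, .r21, .r22, .r23, .r24, .r25, .r26, .r27, .r28, .r29, .r30, .r31] u s := by
  intro r hr
  cases r <;> exact absurd hr (by decide)

/-- `mov ebp, r12d`: the zero-extended low half, as a number. -/
theorem zx32_toNat (z : Word) : (Word.ofBV (BitVec.setWidth 64 (Word.part .w32 z))).toNat = z.toNat % 2 ^ 32 := by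
  unfold Word.ofBV Word.part
  simp only [Width.bits, UInt64.toNat_ofBitVec, BitVec.toNat_setWidth, UInt64.toNat_toBitVec]
  omega

/-- `movsxd rbp, r12d` of a small counter is the counter. -/
theorem sx32_ofNat (i : Nat) (h : i < 2 ^ 31) :
    (Word.ofBV (BitVec.signExtend 64 (Word.part .w32 (UInt64.ofNat i)))).toNat = i := by
  have e : (Word.part .w32 (UInt64.ofNat i)).toNat = i := by
    rw [Vorbis.toNat_part32, UInt64.toNat_ofNat']
    omega
  rw [Vorbis.Spec.toNat_sext32 _ (by omega), e]

/-- The low 16 bits of a small counter (the value `mov [m16], r13w` stores). -/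
theorem part16_ofNat (i : Nat) (h : i < 2 ^ 16) : (Word.part .w16 (UInt64.ofNat i)).toNat = i := by
  unfold Word.part
  simp only [Width.bits, BitVec.toNat_setWidth, UInt64.toNat_toBitVec, UInt64.toNat_ofNat']
  omega

/-- **The step of `z += 1 << codeword_lengths[i]`** (0x104562 – 0x104569) under `z ≤ 1023`: the shift count is taken modulo 32,
so the step is in `[1, 2^31]` and the 32-bit sum does not wrap: `z` grows strictly. -/
theorem shl_step (z : BitVec 32) (k : Nat) (hz : z.toNat ≤ 1023) : z.toNat < (z + 1#32 <<< (k % 32)).toNat := by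
  have hk : k % 32 < 32 := Nat.mod_lt _ (by decide)
  have h1 : 1 ≤ 2 ^ (k % 32) := Nat.one_le_two_pow
  have h2 : 2 ^ (k % 32) ≤ 2 ^ 31 := Nat.pow_le_pow_right (by decide) (by omega)
  rw [BitVec.toNat_add, BitVec.toNat_shiftLeft]
  have e1 : (1#32).toNat = 1 := by decide
  rw [e1, Nat.shiftLeft_eq, Nat.one_mul]
  omega


/-- **`AccelFrame` again after a stretch of code** that wrote only below the saved registers (return addresses of check calls, the
byte `sparse`) and into `fast_huffman`: the footprint grows by that, the shadow and the eight slots are off both windows. -/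
theorem AccelFrame.step {u₀ u : State} {ret : Word} {s s' : State} (hf : AccelFrame u₀ u ret s)
    (hroom : 0x700000 + 96 ≤ (u.reg .rsp).toNat) (htop : (u.reg .rsp).toNat + 8 ≤ 0x800000)
    (hw : 0x119d40 ≤ (u.reg .rdi).toNat ∧ (u.reg .rdi).toNat + 2120 ≤ 0xC00000 ∧
      ((u.reg .rsp).toNat + 8 ≤ (u.reg .rdi).toNat ∨ (u.reg .rdi).toNat + 2120 ≤ 0x700000))
    (rbx : s'.reg .rbx = u.reg .rdi) (rsp : s'.reg .rsp = u.reg .rsp - 72)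
    (eq : Mem.EqOn 0x100000 0x119d40 u₀.mem s'.mem) (df : s'.flags .df = false) (mx : s'.mxcsr &&& 0x1F80 = 0x1F80)
    (hstep : Mem.SameExcept [⟨(u.reg .rsp).toNat - 96, (u.reg .rsp).toNat - 48⟩,
      ⟨(u.reg .rdi).toNat + 48, (u.reg .rdi).toNat + 2096⟩] s.mem s'.mem) : AccelFrame u₀ u ret s' := by
  obtain ⟨_, _, _, _, _, _, hsame, hun, hs0, hs1, hs2, hs3, hs4, hs5, hs6⟩ := hf
  refine ⟨rbx, rsp, kept_all u s', eq, df, mx, ?_, ?_, ?_, ?_, ?_, ?_, ?_, ?_, ?_⟩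
  · -- the footprint
    refine hsame.trans (hstep.mono ?_)
    intro w hw' a h1 h2
    simp only [List.mem_cons, List.not_mem_nil, or_false] at hw'
    rcases hw' with rfl | rfl
    · exact ⟨_, List.mem_cons_self, by simp only []; omega, by simp only [] at h2 ⊢; omega⟩
    · exact ⟨_, List.mem_cons_of_mem _ List.mem_cons_self, h1, h2⟩
  · -- the shadow
    unfold ShadowUntouched at hun ⊢
    refine hun.trans (hstep.eqOn _ _ ?_)
    intro w hw'
    simp only [List.mem_cons, List.not_mem_nil, or_false] at hw'
    rcases hw' with rfl | rfl
    · simp only []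
      omega
    · simp only []
      omega
  · u_frame hs0
  · u_frame hs1
  · u_frame hs2
  · u_frame hs3
  · u_frame hs4
  · u_frame hs5
  · u_frame hs6


/-- `AccelFrame` and the byte `sparse` in its slot after a stretch of a loop body: only the return-address slot of the check calls
(`[rsp₀ − 80, rsp₀ − 72)`) and `fast_huffman` were written. -/
theorem AccelFrame.step_loop {u₀ u : State} {ret : Word} {sp8 : Nat} {s s' : State} (hf : AccelFrame u₀ u ret s)
    (hsb : s.mem.readLE (u.reg .rsp - 57) 1 = sp8)
    (hroom : 0x700000 + 96 ≤ (u.reg .rsp).toNat) (htop : (u.reg .rsp).toNat + 8 ≤ 0x800000)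
    (hw : 0x119d40 ≤ (u.reg .rdi).toNat ∧ (u.reg .rdi).toNat + 2120 ≤ 0xC00000 ∧
      ((u.reg .rsp).toNat + 8 ≤ (u.reg .rdi).toNat ∨ (u.reg .rdi).toNat + 2120 ≤ 0x700000))
    (rbx : s'.reg .rbx = u.reg .rdi) (rsp : s'.reg .rsp = u.reg .rsp - 72)
    (eq : Mem.EqOn 0x100000 0x119d40 u₀.mem s'.mem) (df : s'.flags .df = false) (mx : s'.mxcsr &&& 0x1F80 = 0x1F80)
    (hstep : Mem.SameExcept [⟨(u.reg .rsp).toNat - 96, (u.reg .rsp).toNat - 72⟩,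
      ⟨(u.reg .rdi).toNat + 48, (u.reg .rdi).toNat + 2096⟩] s.mem s'.mem) :
    AccelFrame u₀ u ret s' ∧ s'.mem.readLE (u.reg .rsp - 57) 1 = sp8 := by
  refine ⟨hf.step hroom htop hw rbx rsp eq df mx (hstep.mono ?_), ?_⟩
  · intro w hw' a h1 h2
    simp only [List.mem_cons, List.not_mem_nil, or_false] at hw'
    rcases hw' with rfl | rfl
    · exact ⟨_, List.mem_cons_self, h1, by simp only [] at h2 ⊢; omega⟩
    · exact ⟨_, List.mem_cons_of_mem _ List.mem_cons_self, h1, h2⟩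
  · u_frame hsb

/-- `K5b` reads `fast_huffman` only. -/
theorem k5b_eqOn {m m' : Mem} {c : Nat} {b : Int} (h : Codebook.K5b m c b) (hc : c + 2120 ≤ 2 ^ 64)
    (he : Mem.EqOn (c + 48) (c + 2096) m m') : Codebook.K5b m' c b := by
  intro k hk
  have e : Codebook.fast_huffman m' c k = Codebook.fast_huffman m c k := by
    simp only [vacc, voff]
    exact he.i16 _ (by omega) (by omega) (by omega)
  rw [e]
  exact h k hk

/-- **The store `c->fast_huffman[z] = i`** (0x104559): `z < 1024`, the value a non-negative `int16` below the bound. -/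
theorem k5b_store {m : Mem} {c z : Nat} {b : Int} (w : Word) (v : Nat) (h : Codebook.K5b m c b)
    (hw : w.toNat = c + 48 + 2 * z) (hz : z < 1024) (hc : c + 2120 ≤ 2 ^ 64) (h0 : v < 2 ^ 15) (hb : (v : Int) < b) :
    Codebook.K5b (m.writeLE w 2 v) c b := by
  have hwa : w = addr (c + 48 + 2 * z) := eq_addr _ _ hw
  refine h.store (z := z) (v := (v : Int)) ?_ ?_ (Int.natCast_nonneg _) hb
  · intro k hk hne
    simp only [vacc, voff]
    exact Mem.i16_writeLE m w 2 v _ (by omega) (by omega) (by omega)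
  · simp only [vacc, voff]
    rw [hwa, Mem.i16_writeLE_same]
    have e : v % 2 ^ 16 = v := Nat.mod_eq_of_lt (by omega)
    rw [e]
    unfold sint16
    rw [if_pos (by omega)]

/-- `FHInit` reads `fast_huffman` only. -/
theorem fhinit_eqOn {m m' : Mem} {c i : Nat} (h : Codebook.FHInit m c i) (hi : i ≤ 1024) (hc : c + 2120 ≤ 2 ^ 64)
    (he : Mem.EqOn (c + 48) (c + 2096) m m') : Codebook.FHInit m' c i := by
  intro k hk
  have e : Codebook.fast_huffman m' c k = Codebook.fast_huffman m c k := by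
    simp only [vacc, voff]
    exact he.i16 _ (by omega) (by omega) (by omega)
  rw [e]
  exact h k hk

/-- **The store `c->fast_huffman[i] = -1`** (0x1044c9). -/
theorem fhinit_store {m : Mem} {c i : Nat} (w : Word) (h : Codebook.FHInit m c i) (hi : i < 1024)
    (hw : w.toNat = c + 48 + 2 * i) (hc : c + 2120 ≤ 2 ^ 64) : Codebook.FHInit (m.writeLE w 2 65535) c (i + 1) := by
  have hwa : w = addr (c + 48 + 2 * i) := eq_addr _ _ hw
  refine h.store ?_ ?_
  · intro k hk
    simp only [vacc, voff]
    exact Mem.i16_writeLE m w 2 65535 _ (by omega) (by omega) (by omega)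
  · simp only [vacc, voff]
    rw [hwa, Mem.i16_writeLE_same]
    decide


/-- `add r13d, 1` / `add r12d, 1` on a small counter. -/
theorem inc32_ofNat (i : Nat) (h : i + 1 < 2 ^ 32) :
    Word.ofBV (Word.part .w32 (UInt64.ofNat i) + 1#32) = UInt64.ofNat (i + 1) := by
  have e : (Word.part .w32 (UInt64.ofNat i)).toNat = i := by
    rw [Vorbis.toNat_part32, UInt64.toNat_ofNat']
    omega
  have e1 : (1#32).toNat = 1 := by decide
  apply UInt64.toNat_inj.mp
  rw [Vorbis.toNat_ofBV32, BitVec.toNat_add, e, e1, UInt64.toNat_ofNat']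
  omega

/-- The measure `1024 − z` of the inner loop goes down at its back edge (`shl_step`, in the walker's form of `r12`). -/
theorem shl_step_measure (z : Word) (k : Nat) (hz : z.toNat % 2 ^ 32 ≤ 1023) :
    1024 - (Word.ofBV (Word.part .w32 z + 1#32 <<< (k % 32))).toNat % 2 ^ 32 < 1024 - z.toNat % 2 ^ 32 := by
  have h := shl_step (Word.part .w32 z) k (by rw [Vorbis.toNat_part32]; exact hz)
  rw [Vorbis.toNat_part32] at h
  rw [Vorbis.toNat_ofBV32]
  have hlt := (Word.part .w32 z + 1#32 <<< (k % 32)).isLt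
  omega

/-- A small counter in a 32-bit register, read as a signed number (the walker's form of `cmp r13d, r15d ; jge`). -/
theorem part32_ofNat_toInt (n : Nat) (h : n < 2 ^ 31) : (Word.part .w32 (UInt64.ofNat n)).toInt = (n : Int) := by
  have e : (Word.part .w32 (UInt64.ofNat n)).toNat = n := by
    rw [Vorbis.toNat_part32, UInt64.toNat_ofNat']
    omega
  rw [Vorbis.Spec.toInt_of_lt _ (by omega), e]

/-- **The check site of `c->codeword_lengths[i]`**, `i < len ≤ N(c)` (K3n / K3s). -/
theorem AccelEnv.site_len {Lay : Layout} {μ : Microarch} {u₀ : State} {others : List Obj} {frames : List (Nat × FrameLayout)}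
    {u : State} {ret : Word} {sp8 ent se cl cw sc : Nat} (henv : AccelEnv Lay μ u₀ others frames u ret sp8 ent se cl cw sc)
    {len i : Nat} (hi : i < len) (hld : sp8 = 0 → len ≤ ent) (hls : sp8 ≠ 0 → len ≤ se) :
    Site (Live (stackObjs frames ++ others)) (cl + i) 1 := by
  by_cases h : sp8 = 0
  · have hle := hld h
    exact (henv.dense h).2.1 i (by omega)
  · have hle := hls h
    exact (henv.sparse h).2.1 i (by omega)

/-- A field of the struct at `c`, as a check site. -/
theorem AccelEnv.site_field {Lay : Layout} {μ : Microarch} {u₀ : State} {others : List Obj} {frames : List (Nat × FrameLayout)}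
    {u : State} {ret : Word} {sp8 ent se cl cw sc : Nat} (henv : AccelEnv Lay μ u₀ others frames u ret sp8 ent se cl cw sc)
    (off n : Nat) (h : off + n ≤ 2120) (hn : 1 ≤ n) :
    Site (Live (stackObjs frames ++ others)) ((u.reg .rdi).toNat + off) n :=
  henv.book.sub (by omega) (by omega) hn

/-- **The loop `while (z < FAST_HUFFMAN_TABLE_SIZE)`** (head 0x10456c, stb_vorbis_fixed.c:1175 – 1178), in round `i` of the
outer loop: from its invariant `Inner` to the outer loop's head 0x104579 with `Outer … (i + 1)`. Measure `1024 − z`. -/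
theorem inner_loop {Lay : Layout} {μ : Microarch} {u₀ : State} {others : List Obj} {frames : List (Nat × FrameLayout)}
    {u : State} {ret : Word} {sp8 ent se cl cw sc : Nat} (henv : AccelEnv Lay μ u₀ others frames u ret sp8 ent se cl cw sc)
    (len i : Nat) (hlen : len ≤ 32767) :
    ∀ s, (∃ z p, Inner Lay u₀ u ret sp8 len i z p s) →
      ReachVia Lay μ WayInv s (fun v => Outer u₀ u ret sp8 len (i + 1) v) := by
  refine ReachVia.loop (fun v => 1024 - (v.reg .r12).toNat % 2 ^ 32) ?_
  intro s hinv
  obtain ⟨z, p, w_rip, hfr, hsb, w_r13, w_r15, hilt, w_r12, w_r14, has14, hk5⟩ := hinv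
  have hfr' := hfr
  obtain ⟨w_rbx, w_rsp, w_kept, w_eq, hdf, hmx, hsame, hun, hs0, hs1, hs2, hs3, hs4, hs5, hs6⟩ := hfr'
  have hcode := henv.hcode
  have hμ := henv.hμ
  have hstore2 := henv.hstore2
  have hstack := henv.stack
  have hroom := henv.room
  have htop := henv.top
  have hwbook := henv.wbook
  have hz64 := zx32_toNat z
  have hz32 := Vorbis.toNat_part32 z
  u_walk hcode [hμ.vendor] until [Vorbis.L.compute_accelerated_huffman.loop2, Vorbis.L.compute_accelerated_huffman.loop3] span [Vorbis.L.textLo, Vorbis.L.textHi] side (v_side)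
  · -- 0x104554, the check of `c->fast_huffman[z] = i`: `z ≤ 1023`, inside the struct
    have hun' : ShadowUntouched u.mem s_104554.mem := by v_untouched
    refine Vorbis.Spec.check_site henv.hsh.inv hun' (henv.book.sub (b := (u.reg .rdi).toNat + 48 + 2 * (z.toNat % 2 ^ 32)) (k := 2) (by omega) ?_ (by omega)) ?_
    · simp only [Width.bits] at hbr_104573
      omega
    · simp only [Width.bits] at hbr_104573
      u_omega
  · -- the back edge 0x104569 → 0x10456c
    simp only [Width.bits] at hbr_104573
    have hstep : Mem.SameExcept [⟨(u.reg .rsp).toNat - 96, (u.reg .rsp).toNat - 72⟩,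
        ⟨(u.reg .rdi).toNat + 48, (u.reg .rdi).toNat + 2096⟩] s.mem s_104569.mem := by
      u_same
    have hdf' : s_104569.flags .df = false := by
      rw [w_flags]
      simp only [X86.User.df_setStatus]
      exact w_df_104554
    have hmx' : s_104569.mxcsr &&& 0x1F80 = 0x1F80 := by
      rw [w_mxcsr]
      exact hmx
    obtain ⟨hfr1, hsb1⟩ := hfr.step_loop hsb hroom htop hwbook w_rbx w_rsp w_eq hdf' hmx' hstep
    refine ReachVia.done (Or.inr ⟨⟨_, p, w_rip, hfr1, hsb1, w_r13, w_r15, hilt, w_r12, w_r14, has14, ?_⟩, ?_⟩)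
    · -- K5b: the entry `z` is now `i < i + 1`
      rw [w_mem]
      refine k5b_store (z := z.toNat % 2 ^ 32) _ _ (k5b_eqOn hk5 (by omega) (by u_eqon)) (by u_omega) (by omega) (by omega) ?_ ?_
      · rw [part16_ofNat i (by omega)]
        omega
      · rw [part16_ofNat i (by omega)]
        omega
    · -- the measure: `z` grows
      show 1024 - (s_104569.reg .r12).toNat % 2 ^ 32 < 1024 - z.toNat % 2 ^ 32
      rw [w_r12]
      exact shl_step_measure z _ (by omega)
  · -- the exit: `add r13d, 1`, the outer loop's head
    have hstep : Mem.SameExcept [⟨(u.reg .rsp).toNat - 96, (u.reg .rsp).toNat - 72⟩,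
        ⟨(u.reg .rdi).toNat + 48, (u.reg .rdi).toNat + 2096⟩] s.mem s_104575.mem := by
      u_same
    have hdf' : s_104575.flags .df = false := by
      rw [w_flags]
      simp only [X86.User.df_setStatus]
      exact hdf
    have hmx' : s_104575.mxcsr &&& 0x1F80 = 0x1F80 := by
      rw [w_mxcsr]
      exact hmx
    obtain ⟨hfr1, hsb1⟩ := hfr.step_loop hsb hroom htop hwbook w_rbx w_rsp w_eq hdf' hmx' hstep
    refine ReachVia.done (Or.inl ⟨w_rip, hfr1, hsb1, ?_, w_r15, by omega, ?_⟩)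
    · rw [w_r13, inc32_ofNat i (by omega)]
    · rw [w_mem]
      have e : ((i + 1 : Nat) : Int) = (i : Int) + 1 := by omega
      rw [e]
      exact hk5


/-- A field of the struct as the walker's load reads it is the typed read of the field vocabulary. -/
theorem readLE_off (m : Mem) (w : Word) (k n : Nat) :
    m.readLE (addr (w.toNat + k)) n = m.readLE (w + UInt64.ofNat k) n :=
  (Vorbis.Spec.readLE_field m w k n).symm

/-- **`len ≤ N(c)` in the memory of a loop head / of the exit**: `sparse`, `entries`, `sorted_entries` lie outside the window
`fast_huffman`, so `N(c)` is what it was at entry. -/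
theorem AccelEnv.len_le_N {Lay : Layout} {μ : Microarch} {u₀ : State} {others : List Obj} {frames : List (Nat × FrameLayout)}
    {u : State} {ret : Word} {sp8 ent se cl cw sc : Nat} (henv : AccelEnv Lay μ u₀ others frames u ret sp8 ent se cl cw sc)
    {m : Mem} (hsame : Mem.SameExcept [⟨(u.reg .rsp).toNat - 96, (u.reg .rsp).toNat⟩,
      ⟨(u.reg .rdi).toNat + 48, (u.reg .rdi).toNat + 2096⟩] u.mem m)
    {len : Nat} (hld : sp8 = 0 → len ≤ ent) (hls : sp8 ≠ 0 → len ≤ se) :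
    (len : Int) ≤ Codebook.N m (u.reg .rdi).toNat := by
  have hroom := henv.room
  have htop := henv.top
  have hwbook := henv.wbook
  have f27 : m.readLE (u.reg .rdi + 27) 1 = sp8 := by
    have h := henv.f27
    u_frame h
  have f4 : m.readLE (u.reg .rdi + 4) 4 = ent := by
    have h := henv.f4
    u_frame h
  have f2112 : m.readLE (u.reg .rdi + 2112) 4 = se := by
    have h := henv.f2112
    u_frame h
  have e27 : Codebook.sparse m (u.reg .rdi).toNat = sp8 := by
    simp only [vacc, voff]
    exact (readLE_off m (u.reg .rdi) 27 1).trans f27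
  have e4 : m.u32 ((u.reg .rdi).toNat + 4) = ent := (readLE_off m (u.reg .rdi) 4 4).trans f4
  have e2112 : m.u32 ((u.reg .rdi).toNat + 2112) = se := (readLE_off m (u.reg .rdi) 2112 4).trans f2112
  unfold Codebook.N
  rw [e27]
  by_cases h : sp8 = 0
  · rw [if_pos h]
    have hle := hld h
    have hlt := (henv.dense h).1
    simp only [vacc, voff]
    rw [Mem.i32_def, e4]
    unfold sint32
    rw [if_pos (by omega)]
    omega
  · rw [if_neg h]
    have hle := hls h
    have hlt := (henv.sparse h).1
    simp only [vacc, voff]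
    rw [Mem.i32_def, e2112]
    unfold sint32
    rw [if_pos (by omega)]
    omega


/-- **The loop `for (i = 0; i < len; ++i)`** (head 0x104579, stb_vorbis_fixed.c:1171 – 1180) and the epilogue: from its
invariant `Outer` to the state after the `ret`. `len = min(N(c), 32767)` (`hlen`, `hld`, `hls`). Measure `len − i`. Four paths
from the head: the exit (walked to the `ret`), `codeword_lengths[i] > 10` (the head again), a dense and a sparse book (into the
inner loop `inner_loop`, which ends at the head again). -/
theorem outer_loop {Lay : Layout} {μ : Microarch} {u₀ : State} {others : List Obj} {frames : List (Nat × FrameLayout)}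
    {Blk : Block → Prop}
    {u : State} {ret : Word} {sp8 ent se cl cw sc : Nat} (henv : AccelEnv Lay μ u₀ others frames u ret sp8 ent se cl cw sc)
    (len : Nat) (hlen : len ≤ 32767) (hld : sp8 = 0 → len ≤ ent) (hls : sp8 ≠ 0 → len ≤ se) :
    ∀ s, (∃ i, Outer u₀ u ret sp8 len i s) →
      ReachVia Lay μ WayInv s (Returned (conv u₀) (Spec.compute_accelerated_huffman.spec others frames Blk) u ret) := by
  refine ReachVia.loop (fun v => len - (v.reg .r13).toNat) ?_
  intro s hinv
  obtain ⟨i, w_rip, hfr, hsb, w_r13, w_r15, hile, hk5⟩ := hinv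
  have hfr' := hfr
  obtain ⟨w_rbx, w_rsp, w_kept, w_eq, hdf, hmx, hsame, hun, hs0, hs1, hs2, hs3, hs4, hs5, hs6⟩ := hfr'
  have hcode := henv.hcode
  have hμ := henv.hμ
  have hstore2 := henv.hstore2
  have hload1 := henv.hload1
  have hload4 := henv.hload4
  have hload8 := henv.hload8
  have hbr := henv.hbr
  have hstack := henv.stack
  have hroom := henv.room
  have htop := henv.top
  have hwbook := henv.wbook
  have hret := henv.ret_lt
  have halign := henv.align
  have hi31 : i < 2 ^ 31 := by omega
  have hsx := sx32_ofNat i hi31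
  have hi32 := part32_ofNat_toInt i hi31
  have hl32 := part32_ofNat_toInt len (by omega)
  have hcov := henv.hsh.inv.covers
  -- the fields of the struct the body reads: outside `fast_huffman`, as at entry
  have f8 : s.mem.readLE (u.reg .rdi + 8) 8 = cl := by
    have h := henv.f8
    u_frame h
  have f40 : s.mem.readLE (u.reg .rdi + 40) 8 = cw := by
    have h := henv.f40
    u_frame h
  have f2096 : s.mem.readLE (u.reg .rdi + 2096) 8 = sc := by
    have h := henv.f2096
    u_frame h
  u_walk hcode [hμ.vendor] until [Vorbis.L.compute_accelerated_huffman.loop2, Vorbis.L.compute_accelerated_huffman.loop3] span [Vorbis.L.textLo, Vorbis.L.textHi] side (v_side)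
  case check_104582 =>
    -- `c->codeword_lengths`, the field at `c + 8`
    have hun' : ShadowUntouched u.mem s_104582.mem := by v_untouched
    exact Vorbis.Spec.check_site henv.hsh.inv hun' (henv.site_field 8 8 (by omega) (by omega)) (by u_omega)
  case check_104594 =>
    -- `c->codeword_lengths[i]`, `i < len ≤ N(c)`
    have hun' : ShadowUntouched u.mem s_104594.mem := by v_untouched
    rw [hi32, hl32] at hbr_10457c
    have hsite := henv.site_len (i := i) (len := len) (by omega) hld hls
    have hin := hsite.inside hcov
    exact Vorbis.Spec.check_site henv.hsh.inv hun' hsite (by u_omega)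
  case check_10452e =>
    -- `c->codewords`, the field at `c + 40`
    have hun' : ShadowUntouched u.mem s_10452e.mem := by v_untouched
    exact Vorbis.Spec.check_site henv.hsh.inv hun' (henv.site_field 40 8 (by omega) (by omega)) (by u_omega)
  case check_10453e =>
    -- `c->codewords[i]` of a dense book, `i < len ≤ entries`
    have hun' : ShadowUntouched u.mem s_10453e.mem := by v_untouched
    rw [hi32, hl32] at hbr_10457c
    have hsp0 : sp8 = 0 := by
      have h8 : sp8 < 256 := by
        rw [← hsb]
        exact Mem.readLE_lt' _ _ 1
      omega
    have hle := hld hsp0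
    have hsite := (henv.dense hsp0).2.2 i (by omega)
    have hin := hsite.inside hcov
    refine Vorbis.Spec.check_site henv.hsh.inv hun' hsite ?_
    rw [Vorbis.Spec.sext32_shl2_add _ _ (by rw [UInt64.toNat_ofNat']; omega) (by rw [UInt64.toNat_ofNat']; omega), UInt64.toNat_ofNat']
    omega
  case check_1045ad =>
    -- `c->sorted_codewords`, the field at `c + 2096`
    have hun' : ShadowUntouched u.mem s_1045ad.mem := by v_untouched
    exact Vorbis.Spec.check_site henv.hsh.inv hun' (henv.site_field 2096 8 (by omega) (by omega)) (by u_omega)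
  case check_1045c0 =>
    -- `c->sorted_codewords[i]` of a sparse book, `i < len ≤ sorted_entries`
    have hun' : ShadowUntouched u.mem s_1045c0.mem := by v_untouched
    rw [hi32, hl32] at hbr_10457c
    have hsp1 : sp8 ≠ 0 := by
      intro h0
      apply hbr_1045a4
      rw [h0]
    have hle := hls hsp1
    have hsite := (henv.sparse hsp1).2.2 i (by omega)
    have hin := hsite.inside hcov
    refine Vorbis.Spec.check_site henv.hsh.inv hun' hsite ?_
    rw [Vorbis.Spec.sext32_shl2_add _ _ (by rw [UInt64.toNat_ofNat']; omega) (by rw [UInt64.toNat_ofNat']; omega), UInt64.toNat_ofNat']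
    omega
  case call_inv =>
    v_inv
  case pre_1045c8 =>
    -- `bit_reverse`: the shadow clause at its entry
    show ShadowPre others frames s_1045c8
    refine henv.hsh.callee ?_ ?_ ?_ ?_
    · v_untouched
    · rw [w_rsp]
      u_omega
    · rw [w_rsp]
      u_omega
    · rw [w_rsp]
      u_omega
  · -- 0x1045d2 … 0x1045e0, the exit `i ≥ len`, walked to the `ret`: the contract's `Returned`
    rw [hi32, hl32] at hbr_10457c
    refine ReachVia.done (Or.inl ?_)
    v_returned
    refine ⟨by rw [w_mem]; exact hun, ?_⟩
    -- K5: the loop's invariant with `i = len = min(N(c), 32767)`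
    rw [w_mem]
    have hil : i = len := by omega
    rw [hil] at hk5
    exact Codebook.K5.of_K5b hk5 (henv.len_le_N hsame hld hls) (by omega)
  · -- 0x10459d `ja`: the length is above 10, no entry; `++i`, the head again
    rw [hi32, hl32] at hbr_10457c
    have hstep : Mem.SameExcept [⟨(u.reg .rsp).toNat - 96, (u.reg .rsp).toNat - 72⟩,
        ⟨(u.reg .rdi).toNat + 48, (u.reg .rdi).toNat + 2096⟩] s.mem s_104575.mem := by
      u_same
    have hdf' : s_104575.flags .df = false := by
      rw [w_flags]
      simp only [X86.User.df_setStatus]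
      exact w_df_104594
    have hmx' : s_104575.mxcsr &&& 0x1F80 = 0x1F80 := by
      rw [w_mxcsr]
      exact hmx
    obtain ⟨hfr1, hsb1⟩ := hfr.step_loop hsb hroom htop hwbook w_rbx w_rsp w_eq hdf' hmx' hstep
    have hr13 : s_104575.reg .r13 = UInt64.ofNat (i + 1) := by
      rw [w_r13, inc32_ofNat i (by omega)]
    refine ReachVia.done (Or.inr ⟨⟨i + 1, w_rip, hfr1, hsb1, hr13, w_r15, by omega, ?_⟩, ?_⟩)
    · -- K5b: nothing stored
      refine k5b_eqOn (hk5.mono (by omega)) (by omega) ?_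
      rw [w_mem]
      u_eqon
    · -- the measure `len − i`
      rw [hr13, UInt64.toNat_ofNat', UInt64.toNat_ofNat']
      omega
  · -- 0x104547: a dense book, `z = c->codewords[i]`; the inner loop, then the head again
    rw [hi32, hl32] at hbr_10457c
    have hstep : Mem.SameExcept [⟨(u.reg .rsp).toNat - 96, (u.reg .rsp).toNat - 72⟩,
        ⟨(u.reg .rdi).toNat + 48, (u.reg .rdi).toNat + 2096⟩] s.mem s_104547.mem := by
      u_same
    have hdf' : s_104547.flags .df = false := by
      rw [w_flags]
      exact w_df_10453e
    have hmx' : s_104547.mxcsr &&& 0x1F80 = 0x1F80 := by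
      rw [w_mxcsr]
      exact hmx
    obtain ⟨hfr1, hsb1⟩ := hfr.step_loop hsb hroom htop hwbook w_rbx w_rsp w_eq hdf' hmx' hstep
    have hk5' : Codebook.K5b s_104547.mem (u.reg .rdi).toNat ((i : Int) + 1) := by
      refine k5b_eqOn (hk5.mono (by omega)) (by omega) ?_
      rw [w_mem]
      u_eqon
    have hinner : Inner Lay u₀ u ret sp8 len i _ _ s_104547 :=
      ⟨w_rip, hfr1, hsb1, w_r13, w_r15, by omega, w_r12, w_r14, w_acc_104594, hk5'⟩
    refine (inner_loop henv len i hlen _ ⟨_, _, hinner⟩).mono ?_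
    intro v hv
    refine Or.inr ⟨⟨i + 1, hv⟩, ?_⟩
    rw [hv.r13, UInt64.toNat_ofNat', UInt64.toNat_ofNat']
    omega
  · -- 0x1045cd: a sparse book, after the return of `bit_reverse(c->sorted_codewords[i])`
    rw [hi32, hl32] at hbr_10457c
    v_after_call w_rsp_1045c8 w_mem_1045c8
    -- `bit_reverse` touches no memory: its post says so
    have w_mem : s_1045c8r.mem = s.mem.writeLE (u.reg .rsp - 80) 8 1066445 :=
      (show s_1045c8r.mem = s_1045c8.mem from w_post).trans w_mem_1045c8
    u_walk hcode [hμ.vendor] until [Vorbis.L.compute_accelerated_huffman.loop2] span [Vorbis.L.textLo, Vorbis.L.textHi] side (v_side)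
    -- 0x1045cd `mov r12d, eax`: `z` is whatever `bit_reverse` returned; the inner loop, then the head again
    have hstep : Mem.SameExcept [⟨(u.reg .rsp).toNat - 96, (u.reg .rsp).toNat - 72⟩,
        ⟨(u.reg .rdi).toNat + 48, (u.reg .rdi).toNat + 2096⟩] s.mem s_1045d0.mem := by
      u_same
    have hdf' : s_1045d0.flags .df = false := by
      rw [w_flags]
      exact w_df
    have hmx' : s_1045d0.mxcsr &&& 0x1F80 = 0x1F80 := by
      rw [w_mxcsr]
      exact w_mx
    obtain ⟨hfr1, hsb1⟩ := hfr.step_loop hsb hroom htop hwbook w_rbx w_rsp w_eq hdf' hmx' hstep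
    have hk5' : Codebook.K5b s_1045d0.mem (u.reg .rdi).toNat ((i : Int) + 1) := by
      refine k5b_eqOn (hk5.mono (by omega)) (by omega) ?_
      rw [w_mem]
      u_eqon
    have hinner : Inner Lay u₀ u ret sp8 len i _ _ s_1045d0 :=
      ⟨w_rip, hfr1, hsb1, w_r13, w_r15, by omega, w_r12, w_r14, w_acc_104594, hk5'⟩
    refine (inner_loop henv len i hlen _ ⟨_, _, hinner⟩).mono ?_
    intro v hv
    refine Or.inr ⟨⟨i + 1, hv⟩, ?_⟩
    rw [hv.r13, UInt64.toNat_ofNat', UInt64.toNat_ofNat']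
    omega


/-- **The pure part of `AccelEnv` from the precondition `AccelPre`**: the struct as a site, where it is, and K1 – K4 as the check
sites of the table accesses, over the raw field reads `sparse`, `entries`, `sorted_entries`, `codeword_lengths`, `codewords`,
`sorted_codewords` of the entry memory. -/
theorem pre_facts {others : List Obj} {frames : List (Nat × FrameLayout)} {Blk : Block → Prop} {u : State}
    (hpre : AccelPre others frames Blk u) (hroom : 0x700000 + 96 ≤ (u.reg .rsp).toNat)
    (htop : (u.reg .rsp).toNat + 8 ≤ 0x800000) :
    Site (Live (stackObjs frames ++ others)) (u.reg .rdi).toNat 2120 ∧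
    (0x119d40 ≤ (u.reg .rdi).toNat ∧ (u.reg .rdi).toNat + 2120 ≤ 0xC00000 ∧
      ((u.reg .rsp).toNat + 8 ≤ (u.reg .rdi).toNat ∨ (u.reg .rdi).toNat + 2120 ≤ 0x700000)) ∧
    (u.mem.readLE (u.reg .rdi + 27) 1 = 0 → u.mem.readLE (u.reg .rdi + 4) 4 < 2 ^ 24 ∧
      (∀ i, i < u.mem.readLE (u.reg .rdi + 4) 4 →
        Site (Live (stackObjs frames ++ others)) (u.mem.readLE (u.reg .rdi + 8) 8 + i) 1) ∧
      (∀ i, i < u.mem.readLE (u.reg .rdi + 4) 4 →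
        Site (Live (stackObjs frames ++ others)) (u.mem.readLE (u.reg .rdi + 40) 8 + 4 * i) 4)) ∧
    (u.mem.readLE (u.reg .rdi + 27) 1 ≠ 0 → u.mem.readLE (u.reg .rdi + 2112) 4 < 2 ^ 24 ∧
      (∀ i, i < u.mem.readLE (u.reg .rdi + 2112) 4 →
        Site (Live (stackObjs frames ++ others)) (u.mem.readLE (u.reg .rdi + 8) 8 + i) 1) ∧
      (∀ i, i < u.mem.readLE (u.reg .rdi + 2112) 4 →
        Site (Live (stackObjs frames ++ others)) (u.mem.readLE (u.reg .rdi + 2096) 8 + 4 * i) 4)) := by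
  obtain ⟨hsh, hlive, ⟨B, hB, hin⟩, hK1, hK2, hK3, hK4⟩ := hpre
  -- the accessors of the field vocabulary, as the raw reads the walker leaves
  have e27 : Codebook.sparse u.mem (u.reg .rdi).toNat = u.mem.readLE (u.reg .rdi + 27) 1 := by
    simp only [vacc, voff]
    exact readLE_off u.mem (u.reg .rdi) 27 1
  have e4 : u.mem.u32 ((u.reg .rdi).toNat + 4) = u.mem.readLE (u.reg .rdi + 4) 4 := readLE_off u.mem (u.reg .rdi) 4 4
  have e2112 : u.mem.u32 ((u.reg .rdi).toNat + 2112) = u.mem.readLE (u.reg .rdi + 2112) 4 :=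
    readLE_off u.mem (u.reg .rdi) 2112 4
  have e8 : Codebook.codeword_lengths u.mem (u.reg .rdi).toNat = u.mem.readLE (u.reg .rdi + 8) 8 := by
    simp only [vacc, voff]
    exact readLE_off u.mem (u.reg .rdi) 8 8
  have e40 : Codebook.codewords u.mem (u.reg .rdi).toNat = u.mem.readLE (u.reg .rdi + 40) 8 := by
    simp only [vacc, voff]
    exact readLE_off u.mem (u.reg .rdi) 40 8
  have e2096 : Codebook.sorted_codewords u.mem (u.reg .rdi).toNat = u.mem.readLE (u.reg .rdi + 2096) 8 := by
    simp only [vacc, voff]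
    exact readLE_off u.mem (u.reg .rdi) 2096 8
  have eent : Codebook.entries u.mem (u.reg .rdi).toNat = sint32 (u.mem.readLE (u.reg .rdi + 4) 4) := by
    simp only [vacc, voff]
    rw [Mem.i32_def, e4]
  have ese : Codebook.sorted_entries u.mem (u.reg .rdi).toNat = sint32 (u.mem.readLE (u.reg .rdi + 2112) 4) := by
    simp only [vacc, voff]
    rw [Mem.i32_def, e2112]
  have k1a := hK1.ent_nonneg
  have k1b := hK1.ent_lt
  have k2a := hK2.se_nonneg
  have k2b := hK2.se_le
  rw [eent] at k1a k1b k2b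
  rw [ese] at k2a k2b
  have hlt4 := Mem.readLE_lt' u.mem (u.reg .rdi + 4) 4
  have hlt2112 := Mem.readLE_lt' u.mem (u.reg .rdi + 2112) 4
  have hc4 := sint32_cases (u.mem.readLE (u.reg .rdi + 4) 4)
  have hc2112 := sint32_cases (u.mem.readLE (u.reg .rdi + 2112) 4)
  -- the struct
  have hbook : Site (Live (stackObjs frames ++ others)) (u.reg .rdi).toNat 2120 := by
    simp only [vblock, voff] at hin
    exact Site.of_blk hlive hB (by omega) (by omega) (by omega)
  have hw := Vorbis.Spec.site_where hsh.inv hsh.offText (by omega) hbook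
  have eT : L.textHi = 0x119d40 := rfl
  refine ⟨hbook, by omega, ?_, ?_⟩
  · -- a dense book: K3n
    intro h0
    have k3 := hK3.dense (e27.trans h0)
    have hl := k3.lengths
    have hcw := k3.codewords
    rw [e8, eent] at hl
    rw [e40, eent] at hcw
    have et : (sint32 (u.mem.readLE (u.reg .rdi + 4) 4)).toNat = u.mem.readLE (u.reg .rdi + 4) 4 := by
      rcases hc4 with ⟨_, h2⟩ | ⟨_, h2⟩
      · rw [h2]
        exact Int.toNat_natCast _
      · omega
    rw [et] at hl hcw
    refine ⟨by omega, ?_, ?_⟩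
    · intro i hi
      exact Site.of_blk hlive hl (by simp only []; omega) (by simp only []; omega) (by omega)
    · intro i hi
      exact Site.of_blk hlive hcw (by simp only []; omega) (by simp only []; omega) (by omega)
  · -- a sparse book: K3s, K4
    intro h1
    have hs1 : Codebook.sparse u.mem (u.reg .rdi).toNat = 1 := hK2.sparse_one (by rw [e27]; exact h1)
    have k3 := hK3.sparse hs1
    have hpos := hK2.sparse_pos hs1
    have hl := k3.lengths
    have hsc := hK4.sc hpos
    rw [e8, ese] at hl
    rw [e2096, ese] at hsc
    have et : (sint32 (u.mem.readLE (u.reg .rdi + 2112) 4)).toNat = u.mem.readLE (u.reg .rdi + 2112) 4 := by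
      rcases hc2112 with ⟨_, h2⟩ | ⟨_, h2⟩
      · rw [h2]
        exact Int.toNat_natCast _
      · omega
    rw [et] at hl hsc
    refine ⟨by omega, ?_, ?_⟩
    · intro i hi
      exact Site.of_blk hlive hl (by simp only []; omega) (by simp only []; omega) (by omega)
    · intro i hi
      exact Site.of_blk hlive hsc (by simp only []; omega) (by simp only []; omega) (by omega)


/-- **The invariant of the loop `for (i = 0; i < FAST_HUFFMAN_TABLE_SIZE; ++i)`** at its head 0x1044d3
(stb_vorbis_fixed.c:1164): `r12d = i ≤ 1024`, the entries below `i` are −1 (`FHInit`). -/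
structure Init (u₀ u : State) (ret : Word) (i : Nat) (s : State) : Prop where
  rip : s.rip = Vorbis.L.compute_accelerated_huffman.loop1
  frame : AccelFrame u₀ u ret s
  r12 : s.reg .r12 = UInt64.ofNat i
  ile : i ≤ 1024
  fh : Codebook.FHInit s.mem (u.reg .rdi).toNat i

/-- The byte `movzx eax, BYTE PTR [m]` loaded, as `mov [m8], al` stores it and `test al, al` sees it. -/
theorem byte_rt (n : Nat) (h : n < 256) : (BitVec.setWidth 8 (BitVec.zeroExtend 32 (BitVec.ofNat 8 n))).toNat = n := by
  simp only [BitVec.toNat_setWidth, BitVec.toNat_ofNat, BitVec.truncate_eq_setWidth]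
  omega

/-- A loaded `int` below `2^31`, read as a signed number (the walker's form of `cmp r15d, 0x7fff ; jle`). -/
theorem ofNat32_toInt (n : Nat) (h : n < 2 ^ 31) : (BitVec.ofNat 32 n).toInt = (n : Int) := by
  rw [toInt_ofNat32 n (by omega)]
  unfold sint32
  rw [if_pos (by omega)]

/-- A loaded 32-bit value zero-extended into a register (`mov r15d, [m]`). -/
theorem ofBV_ofNat32 (n : Nat) (h : n < 2 ^ 32) : Word.ofBV (BitVec.ofNat 32 n) = UInt64.ofNat n := by
  apply UInt64.toNat_inj.mp
  rw [Vorbis.toNat_ofBV32, BitVec.toNat_ofNat, UInt64.toNat_ofNat']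
  omega

/-- **From the end of the first loop into the second**: a state `s'` at the head 0x104579 with `r13d = 0`, `r15d = len`, the byte
`sparse` in its slot, reached from the first loop's last head `s` (all 1024 entries −1) by stores below the saved registers
only, runs to the `ret` (`outer_loop` with `i = 0`: `K5b.init`). -/
theorem enter_outer {Lay : Layout} {μ : Microarch} {u₀ : State} {others : List Obj} {frames : List (Nat × FrameLayout)}
    {Blk : Block → Prop}
    {u : State} {ret : Word} {sp8 ent se cl cw sc : Nat} (henv : AccelEnv Lay μ u₀ others frames u ret sp8 ent se cl cw sc)
    {s s' : State} (hfr : AccelFrame u₀ u ret s) (hfh : Codebook.FHInit s.mem (u.reg .rdi).toNat 1024)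
    (len : Nat) (hlen : len ≤ 32767) (hld : sp8 = 0 → len ≤ ent) (hls : sp8 ≠ 0 → len ≤ se)
    (rip : s'.rip = Vorbis.L.compute_accelerated_huffman.loop3)
    (rbx : s'.reg .rbx = u.reg .rdi) (rsp : s'.reg .rsp = u.reg .rsp - 72)
    (eq : Mem.EqOn 0x100000 0x119d40 u₀.mem s'.mem) (df : s'.flags .df = false) (mx : s'.mxcsr &&& 0x1F80 = 0x1F80)
    (r13 : s'.reg .r13 = Word.ofBV 0#32) (r15 : s'.reg .r15 = UInt64.ofNat len)
    (hstep : Mem.SameExcept [⟨(u.reg .rsp).toNat - 96, (u.reg .rsp).toNat - 48⟩] s.mem s'.mem)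
    (sb : s'.mem.readLE (u.reg .rsp - 57) 1 = sp8) :
    ReachVia Lay μ WayInv s' (Returned (conv u₀) (Spec.compute_accelerated_huffman.spec others frames Blk) u ret) := by
  have hroom := henv.room
  have htop := henv.top
  have hwbook := henv.wbook
  have hfr1 : AccelFrame u₀ u ret s' := by
    refine hfr.step hroom htop hwbook rbx rsp eq df mx (hstep.mono ?_)
    intro w hw' a h1 h2
    simp only [List.mem_cons, List.not_mem_nil, or_false] at hw'
    rw [hw'] at h1 h2
    exact ⟨_, List.mem_cons_self, h1, h2⟩
  have hfh1 : Codebook.FHInit s'.mem (u.reg .rdi).toNat 1024 := by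
    refine fhinit_eqOn hfh (Nat.le_refl _) (by omega) (hstep.eqOn _ _ ?_)
    intro w hw'
    simp only [List.mem_cons, List.not_mem_nil, or_false] at hw'
    rw [hw']
    simp only []
    omega
  exact outer_loop henv len hlen hld hls s' ⟨0, rip, hfr1, sb, r13, r15, Nat.zero_le _, Codebook.K5b.init hfh1⟩


/-- **The loop `for (i = 0; i < FAST_HUFFMAN_TABLE_SIZE; ++i) c->fast_huffman[i] = -1`** (head 0x1044d3,
stb_vorbis_fixed.c:1164 – 1165) and everything after it: from its invariant `Init` to the state after the `ret`. Measure
`1024 − i`. The exit computes `len = c->sparse ? c->sorted_entries : c->entries`, clamps it to 32767 (four paths) and enters the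
second loop (`enter_outer`). -/
theorem init_loop {Lay : Layout} {μ : Microarch} {u₀ : State} {others : List Obj} {frames : List (Nat × FrameLayout)}
    {Blk : Block → Prop}
    {u : State} {ret : Word} {sp8 ent se cl cw sc : Nat} (henv : AccelEnv Lay μ u₀ others frames u ret sp8 ent se cl cw sc) :
    ∀ s, (∃ i, Init u₀ u ret i s) →
      ReachVia Lay μ WayInv s (Returned (conv u₀) (Spec.compute_accelerated_huffman.spec others frames Blk) u ret) := by
  refine ReachVia.loop (fun v => 1024 - (v.reg .r12).toNat) ?_
  intro s hinv
  obtain ⟨i, w_rip, hfr, w_r12, hile, hfh⟩ := hinv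
  have hfr' := hfr
  obtain ⟨w_rbx, w_rsp, w_kept, w_eq, hdf, hmx, hsame, hun, hs0, hs1, hs2, hs3, hs4, hs5, hs6⟩ := hfr'
  have hcode := henv.hcode
  have hμ := henv.hμ
  have hstore2 := henv.hstore2
  have hload1 := henv.hload1
  have hload4 := henv.hload4
  have hstack := henv.stack
  have hroom := henv.room
  have htop := henv.top
  have hwbook := henv.wbook
  have hi31 : i < 2 ^ 31 := by omega
  have hsx := sx32_ofNat i hi31
  have hi32 := part32_ofNat_toInt i hi31
  -- the fields of the struct read after the loop: outside `fast_huffman`, as at entry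
  have f27 : s.mem.readLE (u.reg .rdi + 27) 1 = sp8 := by
    have h := henv.f27
    u_frame h
  have f4 : s.mem.readLE (u.reg .rdi + 4) 4 = ent := by
    have h := henv.f4
    u_frame h
  have f2112 : s.mem.readLE (u.reg .rdi + 2112) 4 = se := by
    have h := henv.f2112
    u_frame h
  have hsp8lt : sp8 < 256 := by
    rw [← f27]
    exact Mem.readLE_lt' _ _ 1
  have hbyte := byte_rt sp8 hsp8lt
  have h32767 : (32767#32).toInt = 32767 := by decide
  u_walk hcode [hμ.vendor] until [Vorbis.L.compute_accelerated_huffman.loop1, Vorbis.L.compute_accelerated_huffman.loop3] span [Vorbis.L.textLo, Vorbis.L.textHi] side (v_side)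
  case check_1044c4 =>
    -- `c->fast_huffman[i] = -1`, `i ≤ 1023`: inside the struct
    have hun' : ShadowUntouched u.mem s_1044c4.mem := by v_untouched
    rw [hi32] at hbr_1044da
    have h1023 : (1023#32).toInt = 1023 := by decide
    rw [h1023] at hbr_1044da
    refine Vorbis.Spec.check_site henv.hsh.inv hun' (henv.site_field (48 + 2 * i) 2 (by omega) (by omega)) ?_
    u_omega
  case check_1044e0 =>
    -- `c->sparse`, the field at `c + 27`
    have hun' : ShadowUntouched u.mem s_1044e0.mem := by v_untouched
    exact Vorbis.Spec.check_site henv.hsh.inv hun' (henv.site_field 27 1 (by omega) (by omega)) (by u_omega)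
  case check_10451f =>
    -- `c->entries`, the field at `c + 4`
    have hun' : ShadowUntouched u.mem s_10451f.mem := by v_untouched
    exact Vorbis.Spec.check_site henv.hsh.inv hun' (henv.site_field 4 4 (by omega) (by omega)) (by u_omega)
  case check_1044f8 =>
    -- `c->sorted_entries`, the field at `c + 2112`
    have hun' : ShadowUntouched u.mem s_1044f8.mem := by v_untouched
    exact Vorbis.Spec.check_site henv.hsh.inv hun' (henv.site_field 2112 4 (by omega) (by omega)) (by u_omega)
  · -- the back edge 0x1044cf → 0x1044d3
    rw [hi32] at hbr_1044da
    have h1023 : (1023#32).toInt = 1023 := by decide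
    rw [h1023] at hbr_1044da
    have hstep : Mem.SameExcept [⟨(u.reg .rsp).toNat - 96, (u.reg .rsp).toNat - 48⟩,
        ⟨(u.reg .rdi).toNat + 48, (u.reg .rdi).toNat + 2096⟩] s.mem s_1044cf.mem := by
      u_same
    have hdf' : s_1044cf.flags .df = false := by
      rw [w_flags]
      simp only [X86.User.df_setStatus]
      exact w_df_1044c4
    have hmx' : s_1044cf.mxcsr &&& 0x1F80 = 0x1F80 := by
      rw [w_mxcsr]
      exact hmx
    have hfr1 := hfr.step hroom htop hwbook w_rbx w_rsp w_eq hdf' hmx' hstep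
    have hr12 : s_1044cf.reg .r12 = UInt64.ofNat (i + 1) := by
      rw [w_r12, inc32_ofNat i (by omega)]
    refine ReachVia.done (Or.inr ⟨⟨i + 1, w_rip, hfr1, hr12, by omega, ?_⟩, ?_⟩)
    · -- the entries below `i + 1` are −1
      rw [w_mem]
      refine fhinit_store _ (fhinit_eqOn hfh hile (by omega) (by u_eqon)) (by omega) (by u_omega) (by omega)
    · -- the measure `1024 − i`
      rw [hr12, UInt64.toNat_ofNat', UInt64.toNat_ofNat']
      omega
  · -- a dense book with `entries ≤ 32767`: `len = entries`
    rw [hi32] at hbr_1044da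
    have h1023 : (1023#32).toInt = 1023 := by decide
    rw [h1023] at hbr_1044da
    have hi1024 : i = 1024 := by omega
    rw [hi1024] at hfh
    rw [hbyte] at hbr_1044ef
    have hstep : Mem.SameExcept [⟨(u.reg .rsp).toNat - 96, (u.reg .rsp).toNat - 48⟩] s.mem s_104519.mem := by
      u_same
    have hdf' : s_104519.flags .df = false := by
      rw [w_flags]
      simp only [X86.User.df_setStatus]
      exact w_df_10451f
    have hmx' : s_104519.mxcsr &&& 0x1F80 = 0x1F80 := by
      rw [w_mxcsr]
      exact hmx
    have hsb' : s_104519.mem.readLE (u.reg .rsp - 57) 1 = sp8 := by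
      rw [w_mem, hbyte]
      u_read
    have hent := (henv.dense hbr_1044ef).1
    rw [ofNat32_toInt ent (by omega), h32767] at hbr_10450b
    have hr15 : s_104519.reg .r15 = UInt64.ofNat ent := by
      rw [w_r15, ofBV_ofNat32 ent (by omega)]
    refine (enter_outer (Blk := Blk) henv hfr hfh ent (by omega) (fun _ => Nat.le_refl _) (fun h => absurd hbr_1044ef h)
      w_rip w_rbx w_rsp w_eq hdf' hmx' w_r13 hr15 hstep hsb').mono ?_
    intro v hv
    exact Or.inl hv
  · -- a dense book with `entries > 32767`: `len = 32767`
    rw [hi32] at hbr_1044da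
    have h1023 : (1023#32).toInt = 1023 := by decide
    rw [h1023] at hbr_1044da
    have hi1024 : i = 1024 := by omega
    rw [hi1024] at hfh
    rw [hbyte] at hbr_1044ef
    have hstep : Mem.SameExcept [⟨(u.reg .rsp).toNat - 96, (u.reg .rsp).toNat - 48⟩] s.mem s_104519.mem := by
      u_same
    have hdf' : s_104519.flags .df = false := by
      rw [w_flags]
      simp only [X86.User.df_setStatus]
      exact w_df_10451f
    have hmx' : s_104519.mxcsr &&& 0x1F80 = 0x1F80 := by
      rw [w_mxcsr]
      exact hmx
    have hsb' : s_104519.mem.readLE (u.reg .rsp - 57) 1 = sp8 := by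
      rw [w_mem, hbyte]
      u_read
    have hent := (henv.dense hbr_1044ef).1
    rw [ofNat32_toInt ent (by omega), h32767] at hbr_10450b
    have hr15 : s_104519.reg .r15 = UInt64.ofNat 32767 := by
      rw [w_r15]
      rfl
    refine (enter_outer (Blk := Blk) henv hfr hfh 32767 (Nat.le_refl _) (fun _ => by omega) (fun h => absurd hbr_1044ef h)
      w_rip w_rbx w_rsp w_eq hdf' hmx' w_r13 hr15 hstep hsb').mono ?_
    intro v hv
    exact Or.inl hv
  · -- a sparse book with `sorted_entries ≤ 32767`: `len = sorted_entries`
    rw [hi32] at hbr_1044da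
    have h1023 : (1023#32).toInt = 1023 := by decide
    rw [h1023] at hbr_1044da
    have hi1024 : i = 1024 := by omega
    rw [hi1024] at hfh
    rw [hbyte] at hbr_1044ef
    have hstep : Mem.SameExcept [⟨(u.reg .rsp).toNat - 96, (u.reg .rsp).toNat - 48⟩] s.mem s_104519.mem := by
      u_same
    have hdf' : s_104519.flags .df = false := by
      rw [w_flags]
      simp only [X86.User.df_setStatus]
      exact w_df_1044f8
    have hmx' : s_104519.mxcsr &&& 0x1F80 = 0x1F80 := by
      rw [w_mxcsr]
      exact hmx
    have hsb' : s_104519.mem.readLE (u.reg .rsp - 57) 1 = sp8 := by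
      rw [w_mem, hbyte]
      u_read
    have hse := (henv.sparse hbr_1044ef).1
    rw [ofNat32_toInt se (by omega), h32767] at hbr_10450b
    have hr15 : s_104519.reg .r15 = UInt64.ofNat se := by
      rw [w_r15, ofBV_ofNat32 se (by omega)]
    refine (enter_outer (Blk := Blk) henv hfr hfh se (by omega) (fun h => absurd h hbr_1044ef) (fun _ => Nat.le_refl _)
      w_rip w_rbx w_rsp w_eq hdf' hmx' w_r13 hr15 hstep hsb').mono ?_
    intro v hv
    exact Or.inl hv
  · -- a sparse book with `sorted_entries > 32767`: `len = 32767`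
    rw [hi32] at hbr_1044da
    have h1023 : (1023#32).toInt = 1023 := by decide
    rw [h1023] at hbr_1044da
    have hi1024 : i = 1024 := by omega
    rw [hi1024] at hfh
    rw [hbyte] at hbr_1044ef
    have hstep : Mem.SameExcept [⟨(u.reg .rsp).toNat - 96, (u.reg .rsp).toNat - 48⟩] s.mem s_104519.mem := by
      u_same
    have hdf' : s_104519.flags .df = false := by
      rw [w_flags]
      simp only [X86.User.df_setStatus]
      exact w_df_1044f8
    have hmx' : s_104519.mxcsr &&& 0x1F80 = 0x1F80 := by
      rw [w_mxcsr]
      exact hmx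
    have hsb' : s_104519.mem.readLE (u.reg .rsp - 57) 1 = sp8 := by
      rw [w_mem, hbyte]
      u_read
    have hse := (henv.sparse hbr_1044ef).1
    rw [ofNat32_toInt se (by omega), h32767] at hbr_10450b
    have hr15 : s_104519.reg .r15 = UInt64.ofNat 32767 := by
      rw [w_r15]
      rfl
    refine (enter_outer (Blk := Blk) henv hfr hfh 32767 (Nat.le_refl _) (fun h => absurd h hbr_1044ef) (fun _ => by omega)
      w_rip w_rbx w_rsp w_eq hdf' hmx' w_r13 hr15 hstep hsb').mono ?_
    intro v hv
    exact Or.inl hv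


end Vorbis.Spec.compute_accelerated_huffman
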